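-- pv_equiv track=rewrite | github.com/buskap/tp_clean_code | functions/functions.py | keyVerification
-- ===== SOURCE A (Python) =====
-- import string
--
-- def keyVerification(id):
--     """Verifie la validité de l'identifiant
--
--     Args:
--         id (str): l'id doit être de longueur 10 et contenir la clé en majuscule (A-Z) suivi des 9 chiffres de l'identifiant (ex: A123456789)
--
--     Returns:
--         Bool: True est retourné si l'identifiant correspond à la clé, false sinon
--     """
--     if(estValide(id)):
--         res = calculKey(id[1:])
--         while( res > 15 ):
--             res = calculKey(str(res))
--         key = id[0]
--         #Correspondance alphabetique
--         values = dict()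
--         for index, letter in enumerate(string.ascii_uppercase):
--             values[letter] = index + 1
--
--         #Vérification de la validité de la clé
--         if( (values[key] == res+1) or ( res==0 and key == "Z") ):
--             return True
--
--     else:
--         return False
--
-- def calculKey( id ):
--     """Calcul la somme de des chiffres de l'id
--     Args:
--         id (str):
--     Returns:
--         int: retourne le resultat de la somme sous forme de int
--     """
--     if(len(id) > 1 ):
--         return int(id[0]) + calculKey( id[1:])
--     else:
--         return int(id)
--
-- def estValide(id):
--     """Verifie la validité du format de l'identifiant
--     Args:
--         id (str): String de longueur 10 contenant une clé : caractère alpha en majuscule en première position (A-Z) suivie d'une suite de 9 chiffres (identifiant)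
--     Returns:
--         bool: True est retourné si l'id est valide, False sinon
--     """
--     if ( len (id) == 10):
--         key = id[0]
--         #Test de validité de la clé
--         if(key.isupper()):
--             #test que l'id est une suite de neuf chiffres
--             identifiant = id[1:]
--             for element in identifiant:
--                 try:
--                     int(element)
--                     break
--                 except:
--                     return False
--             return True
--         else:
--             return False
--     else:
--         return False
-- ===== SOURCE B (Python) =====
-- def keyVerification(id):
--     """Flat one-pass rewrite: format guard, arithmetic digit sum + arithmetic
--     reduction loop, and an ord()-based key comparison (no dict, no recursion).
--     Where A raises ValueError (well-started id with a later non-digit char),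
--     this version simply treats the id as invalid and returns False.
--     Like A, it returns None (implicit) for a well-formed id whose key does not match."""
--     if len(id) != 10 or not ('A' <= id[0] <= 'Z') or not id[1:].isdigit():
--         return False
--     res = sum(ord(c) - ord('0') for c in id[1:])
--     while res > 15:
--         res = res // 10 + res % 10
--     if ord(id[0]) - ord('A') == res or (res == 0 and id[0] == 'Z'):
--         return True
-- ===== Notes on version B (the rewrite author's own statement) =====
-- stated objective: simpler
-- what changed: Collapses the three functions into one flat guard-and-return pass: the recursive calculKey becomes an arithmetic digit sum, the string-based reduction loop becomes res//10+res%10, and the 26-entry dict is replaced by an ord() comparison.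
import Mathlib
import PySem

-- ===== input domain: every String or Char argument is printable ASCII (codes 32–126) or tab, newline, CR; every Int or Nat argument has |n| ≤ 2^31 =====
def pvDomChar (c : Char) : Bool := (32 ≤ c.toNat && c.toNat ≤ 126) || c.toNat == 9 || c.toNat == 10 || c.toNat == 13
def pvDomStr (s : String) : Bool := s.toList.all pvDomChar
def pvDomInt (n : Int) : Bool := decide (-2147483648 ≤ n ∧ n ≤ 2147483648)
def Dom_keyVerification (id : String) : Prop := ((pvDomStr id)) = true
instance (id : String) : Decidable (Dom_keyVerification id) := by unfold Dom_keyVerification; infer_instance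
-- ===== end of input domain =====

-- B collapses A's three helpers into one flat pass (arithmetic digit sum, //10+%10 reduction, ord-style key check, no dict); return values agree on Pre_ (where A does not raise).


-- ===== PORT A =====
-- calculKey: recursive digit sum via int() on one-char strings (none = ValueError)
def calculKeyA : List Char → Option Int
  | [] => PySem.Int.ofChars? []          -- len ≤ 1 branch: int("")
  | [c] => PySem.Int.ofChars? [c]        -- len ≤ 1 branch: int(single char)
  | c :: rest =>
      match PySem.Int.ofChars? [c], calculKeyA rest with
      | some a, some b => some (a + b)
      | _, _ => none

-- the for/try/break loop of estValide: decides on the FIRST element only (break / return False)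
def estLoopA : List Char → Bool
  | [] => true                                   -- empty loop falls through to return True
  | c :: _ => (PySem.Int.ofChars? [c]).isSome    -- int ok → break → True; ValueError → return False

def estValideA (l : List Char) : Bool :=
  if l.length = 10 then
    match PySem.List.pyGet? l 0 with
    | none => false                              -- unreachable: length is 10
    | some key =>
      if PySem.Chars.isupper key then estLoopA (PySem.List.slice l (some 1) none)
      else false
  else false

-- values dict: for index, letter in enumerate(ascii_uppercase): values[letter] = index + 1
def valuesA : PySem.Dict Char Int :=
  (PySem.List.enumerate (String.toList "ABCDEFGHIJKLMNOPQRSTUVWXYZ")).foldl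
    (fun d p => d.insert p.2 (p.1 + 1)) PySem.Dict.empty

-- while res > 15: res = calculKey(str(res)) — fuel only makes the loop total; it never
-- runs out on reachable values (a digit sum strictly shrinks)
def loopA : Nat → Int → Option Int
  | 0, _ => none
  | f+1, res =>
      if res > 15 then
        match calculKeyA (PySem.Int.toChars res) with
        | none => none
        | some r => loopA f r
      else some res

def keyVerification (id : String) : Option Bool :=
  if estValideA id.toList then
    match calculKeyA (PySem.List.slice id.toList (some 1) none) with
    | none => none                               -- ValueError propagates (outside Pre_)
    | some r0 =>
      match loopA (r0.toNat + 1) r0 with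
      | none => none                             -- fuel exhaustion: unreachable
      | some res =>
        match PySem.List.pyGet? id.toList 0 with
        | none => none                           -- unreachable: length is 10
        | some key =>
          match valuesA.get? key with
          | none => none                         -- KeyError: unreachable for ASCII input
          | some v =>
            if v == res + 1 || (res == 0 && key == 'Z') then some true
            else none                            -- falls off the end: Python returns None
  else some false

-- ===== PORT B =====
-- while res > 15: res = res // 10 + res % 10  (fuel only makes the loop total)
def bLoop : Nat → Int → Int
  | 0, res => res
  | f+1, res =>
      if 15 < res then bLoop f (PySem.Int.floordiv res 10 + PySem.Int.mod res 10) else res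

-- sum(ord(c) - ord('0') for c in id[1:])
def digitSumB (l : List Char) : Int := l.foldl (fun a c => a + ((c.toNat : Int) - 48)) 0

-- the whole flat body of B, on the character list of id
def bFlat : List Char → Option Bool
  | [] => some false
  | key :: rest =>
    if rest.length = 9 ∧ ('A' ≤ key ∧ key ≤ 'Z') ∧ PySem.Chars.strIsdigit rest = true then
      let r0 := digitSumB rest
      let res := bLoop (r0.toNat + 1) r0
      if (key.toNat : Int) - 65 = res ∨ (res = 0 ∧ key = 'Z') then some true
      else none                                  -- mismatched key: None, as in A
    else some false

def keyVerification_alt (id : String) : Option Bool := bFlat id.toList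

-- ===== PRECONDITION & SPEC =====
-- exactly the ids on which A raises ValueError: uppercase key, first identifier
-- character a digit, but a later identifier character not a digit
def raisesTest (l : List Char) : Bool :=
  match l with
  | c0 :: c1 :: rest =>
      rest.length == 8 && PySem.Chars.isupper c0 && PySem.Chars.isdigit c1
        && !(rest.all PySem.Chars.isdigit)
  | _ => false

-- Pre_ excludes exactly the inputs where A raises ValueError (raisesTest above); A returns normally everywhere else (B returns False on the excluded ids)
def Pre_keyVerification (id : String) : Prop := raisesTest id.toList = false
instance (id : String) : Decidable (Pre_keyVerification id) := by unfold Pre_keyVerification; infer_instance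
def pvWitness_keyVerification : String := "A123456789"


def Spec_keyVerification (id : String) (out : Option Bool) : Prop := out = keyVerification_alt id
instance (id : String) (out : Option Bool) : Decidable (Spec_keyVerification id out) := by unfold Spec_keyVerification; infer_instance

-- ===== CLAIM (what is proved, stated in full; the proofs are below) =====
def Claim_equal_keyVerification : Prop := ∀ (id : String), Dom_keyVerification id → Pre_keyVerification id → Spec_keyVerification id (keyVerification id)

-- ===== LEMMAS AND PROOFS =====

-- facts about single printable-ASCII characters, by enumeration
theorem charfacts : ∀ n < 127,
    ((PySem.Int.ofChars? [Char.ofNat n]).isSome = PySem.Chars.isdigit (Char.ofNat n))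
  ∧ (PySem.Chars.isdigit (Char.ofNat n) = true → PySem.Int.ofChars? [Char.ofNat n] = some ((n : Int) - 48))
  ∧ (PySem.Chars.isdigit (Char.ofNat n) = true → 48 ≤ n ∧ n ≤ 57)
  ∧ (PySem.Chars.isupper (Char.ofNat n) = true → 65 ≤ n ∧ n ≤ 90) := by decide

theorem dictfact : ∀ n < 91, 65 ≤ n → valuesA.get? (Char.ofNat n) = some ((n : Int) - 64) := by decide

theorem loopfact : ∀ n < 82, loopA (n + 1) (n : Int) = some (bLoop (n + 1) (n : Int)) := by decide

theorem domChar_lt (c : Char) (h : pvDomChar c = true) : c.toNat < 127 := by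
  simp [pvDomChar] at h; omega

theorem parse_eq_isdigit (c : Char) (h : pvDomChar c = true) :
    (PySem.Int.ofChars? [c]).isSome = PySem.Chars.isdigit c := by
  have := (charfacts c.toNat (domChar_lt c h)).1
  rwa [Char.ofNat_toNat] at this

theorem parse_of_isdigit (c : Char) (h : pvDomChar c = true) (hd : PySem.Chars.isdigit c = true) :
    PySem.Int.ofChars? [c] = some ((c.toNat : Int) - 48) := by
  have := (charfacts c.toNat (domChar_lt c h)).2.1
  rw [Char.ofNat_toNat] at this
  exact this hd

theorem toNat_of_isdigit (c : Char) (h : pvDomChar c = true) (hd : PySem.Chars.isdigit c = true) :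
    48 ≤ c.toNat ∧ c.toNat ≤ 57 := by
  have := (charfacts c.toNat (domChar_lt c h)).2.2.1
  rw [Char.ofNat_toNat] at this
  exact this hd

theorem toNat_of_isupper (c : Char) (h : pvDomChar c = true) (hu : PySem.Chars.isupper c = true) :
    65 ≤ c.toNat ∧ c.toNat ≤ 90 := by
  have := (charfacts c.toNat (domChar_lt c h)).2.2.2
  rw [Char.ofNat_toNat] at this
  exact this hu

theorem values_get (c : Char) (h : pvDomChar c = true) (hu : PySem.Chars.isupper c = true) :
    valuesA.get? c = some ((c.toNat : Int) - 64) := by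
  obtain ⟨h1, h2⟩ := toNat_of_isupper c h hu
  have := dictfact c.toNat (by omega) h1
  rwa [Char.ofNat_toNat] at this

theorem calcKey_digits : ∀ (l : List Char), l ≠ [] →
    (∀ c ∈ l, pvDomChar c = true) → (∀ c ∈ l, PySem.Chars.isdigit c = true) →
    calculKeyA l = some ((l.map (fun c => ((c.toNat : Int) - 48))).sum)
  | [], h, _, _ => absurd rfl h
  | [c], _, hdom, hd => by
      simp [calculKeyA, parse_of_isdigit c (hdom c (by simp)) (hd c (by simp))]
  | c :: c2 :: t, _, hdom, hd => by
      have ih := calcKey_digits (c2 :: t) (by simp)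
        (fun x hx => hdom x (List.mem_cons_of_mem _ hx))
        (fun x hx => hd x (List.mem_cons_of_mem _ hx))
      simp only [calculKeyA, parse_of_isdigit c (hdom c (by simp)) (hd c (by simp)), ih,
        List.map_cons, List.sum_cons]

theorem digitSum_eq (l : List Char) :
    digitSumB l = (l.map (fun c => ((c.toNat : Int) - 48))).sum := by
  induction l with
  | nil => simp [digitSumB]
  | cons c t ih =>
      simp only [digitSumB, List.foldl_cons, List.map_cons, List.sum_cons] at *
      rw [PySem.List.foldl_add] at *
      omega

theorem sum_bounds (l : List Char) (hdom : ∀ c ∈ l, pvDomChar c = true)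
    (hd : ∀ c ∈ l, PySem.Chars.isdigit c = true) :
    0 ≤ (l.map (fun c => ((c.toNat : Int) - 48))).sum ∧
    (l.map (fun c => ((c.toNat : Int) - 48))).sum ≤ 9 * l.length := by
  induction l with
  | nil => simp
  | cons c t ih =>
      have hb := toNat_of_isdigit c (hdom c (by simp)) (hd c (by simp))
      have iht := ih (fun x hx => hdom x (by simp [hx])) (fun x hx => hd x (by simp [hx]))
      simp only [List.map_cons, List.sum_cons, List.length_cons]
      push_cast
      omega

theorem isupper_iff (c : Char) : PySem.Chars.isupper c = true ↔ ('A' ≤ c ∧ c ≤ 'Z') := by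
  simp [PySem.Chars.isupper]

-- ===== VERDICT (by name: the statement is the Claim_ definition above) =====
theorem keyVerification_spec : Claim_equal_keyVerification := by
  intro id hdom hpre
  unfold Spec_keyVerification keyVerification keyVerification_alt
  unfold Dom_keyVerification pvDomStr at hdom
  rw [List.all_eq_true] at hdom
  unfold Pre_keyVerification at hpre
  cases hl : id.toList with
  | nil => simp [estValideA, bFlat]
  | cons key rest =>
    rw [hl] at hdom hpre
    by_cases hlen : rest.length = 9
    case neg =>
      have hv : estValideA (key :: rest) = false := by
        simp [estValideA, hlen]
      rw [if_neg (by simp [hv])]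
      simp only [bFlat]
      rw [if_neg (fun h => hlen h.1)]
    case pos =>
      obtain ⟨c1, rest2, rfl⟩ : ∃ c1 rest2, rest = c1 :: rest2 := by
        cases rest with
        | nil => simp at hlen
        | cons a b => exact ⟨a, b, rfl⟩
      have hlen2 : rest2.length = 8 := by simpa using hlen
      have hdk : pvDomChar key = true := hdom key (by simp)
      have hd1dom : pvDomChar c1 = true := hdom c1 (by simp)
      have hslice : PySem.List.slice (key :: c1 :: rest2) (some 1) none = c1 :: rest2 := by
        simp [pysem]
      have hget0 : PySem.List.pyGet? (key :: c1 :: rest2) (0 : Int) = some key := by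
        simp [pysem]
      by_cases hup : PySem.Chars.isupper key = true
      case neg =>
        have hup' : PySem.Chars.isupper key = false := by simpa using hup
        have hv : estValideA (key :: c1 :: rest2) = false := by
          simp [estValideA, hlen2, hup']
        have hnB : ¬ ((c1 :: rest2).length = 9 ∧ ('A' ≤ key ∧ key ≤ 'Z')
            ∧ PySem.Chars.strIsdigit (c1 :: rest2) = true) := by
          rw [isupper_iff] at hup; tauto
        rw [if_neg (by simp [hv])]
        simp only [bFlat]
        rw [if_neg hnB]
      case pos =>
      by_cases hd1 : PySem.Chars.isdigit c1 = true
      case neg =>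
        have hd1' : PySem.Chars.isdigit c1 = false := by simpa using hd1
        have hv : estValideA (key :: c1 :: rest2) = false := by
          simp [estValideA, hlen2, hup, hslice, estLoopA,
            parse_eq_isdigit c1 hd1dom, hd1']
        have hsd : PySem.Chars.strIsdigit (c1 :: rest2) = false := by
          simp [PySem.Chars.strIsdigit, hd1']
        rw [if_neg (by simp [hv])]
        simp only [bFlat]
        rw [if_neg (fun h => by simp [hsd] at h)]
      case pos =>
        have h8b : (rest2.length == 8) = true := by simpa using hlen2
        have hallb : rest2.all PySem.Chars.isdigit = true := by
          cases h : rest2.all PySem.Chars.isdigit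
          · simp [raisesTest, h8b, hup, hd1, h] at hpre
          · rfl
        have hall : ∀ c ∈ rest2, PySem.Chars.isdigit c = true := by
          simpa [List.all_eq_true] using hallb
        have halld : ∀ c ∈ c1 :: rest2, PySem.Chars.isdigit c = true := by
          intro c hc
          rcases List.mem_cons.mp hc with h | h
          · subst h; exact hd1
          · exact hall c h
        have hdomall : ∀ c ∈ c1 :: rest2, pvDomChar c = true := by
          intro c hc; exact hdom c (List.mem_cons_of_mem _ hc)
        obtain ⟨S, hS⟩ : ∃ S, ((c1 :: rest2).map (fun c => ((c.toNat : Int) - 48))).sum = S :=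
          ⟨_, rfl⟩
        have hck' : calculKeyA (c1 :: rest2) = some S := by
          rw [calcKey_digits (c1 :: rest2) (by simp) hdomall halld, hS]
        have hds' : digitSumB (c1 :: rest2) = S := by rw [digitSum_eq, hS]
        have hSb : 0 ≤ S ∧ S ≤ 81 := by
          have hb := sum_bounds (c1 :: rest2) hdomall halld
          rw [hS] at hb
          have h9 : (c1 :: rest2).length = 9 := by simp [hlen2]
          rw [h9] at hb
          omega
        have hcast : ((S.toNat : Int)) = S := Int.toNat_of_nonneg hSb.1
        have hloop : loopA (S.toNat + 1) S = some (bLoop (S.toNat + 1) S) := by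
          have h := loopfact S.toNat (by omega)
          rwa [hcast] at h
        have hv : estValideA (key :: c1 :: rest2) = true := by
          simp [estValideA, hlen2, hup, hslice, estLoopA,
            parse_eq_isdigit c1 hd1dom, hd1]
        have hsd : PySem.Chars.strIsdigit (c1 :: rest2) = true := by
          simpa [PySem.Chars.strIsdigit, hd1] using hallb
        have hguardB : ((c1 :: rest2).length = 9 ∧ ('A' ≤ key ∧ key ≤ 'Z')
            ∧ PySem.Chars.strIsdigit (c1 :: rest2) = true) :=
          ⟨by simp [hlen2], (isupper_iff key).mp hup, hsd⟩
        rw [if_pos hv]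
        simp only [bFlat]
        rw [if_pos hguardB]
        simp only [hslice, hck', hget0, values_get key hdk hup, hds', hloop]
        have hiff : ∀ res : Int,
            (((key.toNat : Int) - 64 == res + 1) || (res == 0 && key == 'Z')) = true
              ↔ ((key.toNat : Int) - 65 = res ∨ (res = 0 ∧ key = 'Z')) := by
          intro res
          simp only [Bool.or_eq_true, Bool.and_eq_true, beq_iff_eq]
          constructor
          · rintro (h | ⟨h1, h2⟩)
            · left; omega
            · exact Or.inr ⟨h1, h2⟩
          · rintro (h | ⟨h1, h2⟩)
            · left; omega
            · exact Or.inr ⟨h1, h2⟩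
        by_cases hcond : ((key.toNat : Int) - 65 = bLoop (S.toNat + 1) S
            ∨ (bLoop (S.toNat + 1) S = 0 ∧ key = 'Z'))
        · rw [if_pos ((hiff _).mpr hcond), if_pos hcond]
        · rw [if_neg (fun hh => hcond ((hiff _).mp hh)), if_neg hcond]
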